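-- pv_equiv track=rewrite | github.com/mfkiwl/GoWinSDR | Software/python_SDR/wifi_beacon_gen.py | scrambler
-- ===== SOURCE A (Python) =====
-- def scrambler(bits):
--     """
--     IEEE 802.11b Scrambler
--     Poly: X^7 + X^4 + 1
--     Seed: 必须非零，这里随机选一个，例如 0b1011101
--     """
--     state = [1, 0, 1, 1, 1, 0, 1]  # 初始种子 (7 bits)
--     out_bits = []
--
--     for b in bits:
--         # 反馈位: x^7 + x^4
--         feedback = state[6] ^ state[3]
--         # 更新状态 (移位)
--         state = [feedback] + state[:-1]
--         # 输出位 = 输入位 XOR 反馈位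
--         out_bits.append(b ^ feedback)
--
--     return out_bits
-- ===== SOURCE B (Python) =====
-- def scrambler(bits):
--     # Precompute one full 127-bit period of the LFSR keystream, then XOR by modular index.
--     state = [1, 0, 1, 1, 1, 0, 1]
--     table = []
--     for _ in range(127):
--         fb = state[6] ^ state[3]
--         state = [fb] + state[:-1]
--         table.append(fb)
--     return [b ^ table[i % 127] for i, b in enumerate(bits)]
-- ===== Notes on version B (the rewrite author's own statement) =====
-- stated objective: faster
-- what changed: B precomputes the full 127-bit LFSR keystream period into a table once and produces the output as a single indexed pass b ^ table[i % 127], instead of rebuilding a shifted 7-bit register list for every input bit.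
import Mathlib
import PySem

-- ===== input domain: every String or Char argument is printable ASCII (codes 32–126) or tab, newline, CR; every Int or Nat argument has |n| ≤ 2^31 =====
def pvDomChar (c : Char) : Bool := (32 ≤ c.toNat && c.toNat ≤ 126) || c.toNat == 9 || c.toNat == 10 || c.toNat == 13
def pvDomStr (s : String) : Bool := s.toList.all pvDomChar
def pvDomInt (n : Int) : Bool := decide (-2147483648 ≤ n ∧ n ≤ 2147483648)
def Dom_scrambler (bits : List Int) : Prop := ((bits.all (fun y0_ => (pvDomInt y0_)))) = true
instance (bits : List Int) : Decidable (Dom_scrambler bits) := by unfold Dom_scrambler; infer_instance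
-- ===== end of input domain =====

-- B replaces A's live shifting LFSR state with a precomputed 127-bit keystream table
-- indexed modularly (objective: faster by a constant factor, measured).

-- ===== PORT A =====
-- one iteration of A's loop; pair = (state, out_bits)
def scrStepA (p : List Int × List Int) (b : Int) : List Int × List Int :=
  let feedback := PySem.Int.bxor (PySem.List.pyGetD p.1 6 0) (PySem.List.pyGetD p.1 3 0)
  (feedback :: PySem.List.slice p.1 none (some (-1)), p.2 ++ [PySem.Int.bxor b feedback])

def scrambler (bits : List Int) : List Int :=
  (bits.foldl scrStepA ([1, 0, 1, 1, 1, 0, 1], [])).2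

-- ===== PORT B =====
-- B's table-building loop: for _ in range(127): fb = state[6]^state[3]; shift; table.append(fb)
def scrTable : List Int :=
  ((PySem.List.pyRange 0 127 1).foldl (fun (p : List Int × List Int) _ =>
    let fb := PySem.Int.bxor (PySem.List.pyGetD p.1 6 0) (PySem.List.pyGetD p.1 3 0)
    (fb :: PySem.List.slice p.1 none (some (-1)), p.2 ++ [fb]))
    ([1, 0, 1, 1, 1, 0, 1], [])).2

def scrambler_alt (bits : List Int) : List Int :=
  (PySem.List.enumerate bits).map (fun p =>
    PySem.Int.bxor p.2 (PySem.List.pyGetD scrTable (PySem.Int.mod p.1 127) 0))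

-- ===== PRECONDITION & SPEC =====
def Spec_scrambler (bits : List Int) (out : List Int) : Prop := out = scrambler_alt bits
instance (bits : List Int) (out : List Int) : Decidable (Spec_scrambler bits out) := by unfold Spec_scrambler; infer_instance

-- ===== CLAIM (what is proved, stated in full; the proofs are below) =====
def Claim_equal_scrambler : Prop := ∀ (bits : List Int), Dom_scrambler bits → Spec_scrambler bits (scrambler bits)

-- ===== LEMMAS AND PROOFS =====

-- the LFSR seed, feedback and state update shared by both programs
def scrSeed : List Int := [1, 0, 1, 1, 1, 0, 1]

def scrFb (s : List Int) : Int :=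
  PySem.Int.bxor (PySem.List.pyGetD s 6 0) (PySem.List.pyGetD s 3 0)

def scrShift (s : List Int) : List Int :=
  scrFb s :: PySem.List.slice s none (some (-1))

-- reference stream: A's loop without the accumulator
def scrPure : List Int → List Int → List Int
  | _, [] => []
  | s, b :: rest => PySem.Int.bxor b (scrFb s) :: scrPure (scrShift s) rest

theorem scrA_eq_pure (bits : List Int) : ∀ (s acc : List Int),
    (bits.foldl scrStepA (s, acc)).2 = acc ++ scrPure s bits := by
  induction bits with
  | nil => intro s acc; simp [scrPure]
  | cons b rest ih =>
      intro s acc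
      simp [List.foldl_cons, scrStepA, scrPure, ih, scrFb, scrShift]

set_option maxRecDepth 100000 in
theorem scrShift_period : scrShift^[127] scrSeed = scrSeed := by decide

theorem scrShift_iterate_mod (n : Nat) :
    scrShift^[n] scrSeed = scrShift^[n % 127] scrSeed := by
  induction n using Nat.strong_induction_on with
  | _ n ih =>
      by_cases h : n < 127
      · rw [Nat.mod_eq_of_lt h]
      · have this : scrShift^[n] scrSeed = scrShift^[n - 127] scrSeed := by
          have key : scrShift^[n] scrSeed
              = scrShift^[n - 127] (scrShift^[127] scrSeed) := by
            rw [← Function.iterate_add_apply]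
            congr 1
            omega
          rw [key, scrShift_period]
        calc scrShift^[n] scrSeed = scrShift^[n - 127] scrSeed := this
          _ = scrShift^[(n - 127) % 127] scrSeed := ih (n - 127) (by omega)
          _ = scrShift^[n % 127] scrSeed := by
                rw [show (n - 127) % 127 = n % 127 from by omega]

set_option maxRecDepth 100000 in
theorem scrTable_getD : ∀ k : Fin 127,
    (scrTable.getD k.val 0 = scrFb (scrShift^[k.val] scrSeed)) := by decide

theorem scrTable_fb (n : Nat) :
    PySem.List.pyGetD scrTable (PySem.Int.mod (n : Int) 127) 0
      = scrFb (scrShift^[n] scrSeed) := by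
  have h127 : ((127 : Nat) : Int) = (127 : Int) := by norm_num
  rw [← h127, PySem.Int.mod_natCast, PySem.List.pyGetD_natCast,
      scrTable_getD ⟨n % 127, Nat.mod_lt _ (by omega)⟩, ← scrShift_iterate_mod]

theorem scrB_eq_pure (bits : List Int) : ∀ (n : Nat),
    (PySem.List.enumerate bits (n : Int)).map (fun p =>
      PySem.Int.bxor p.2 (PySem.List.pyGetD scrTable (PySem.Int.mod p.1 127) 0))
      = scrPure (scrShift^[n] scrSeed) bits := by
  induction bits with
  | nil => intro n; simp [PySem.List.enumerate_nil, scrPure]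
  | cons b rest ih =>
      intro n
      rw [PySem.List.enumerate_cons, List.map_cons, scrPure]
      have hcast : ((n : Int) + 1) = ((n + 1 : Nat) : Int) := by push_cast; ring
      rw [hcast, ih (n + 1), scrTable_fb n, Function.iterate_succ_apply']

-- ===== VERDICT (by name: the statement is the Claim_ definition above) =====
theorem scrambler_spec : Claim_equal_scrambler := by
  intro bits _
  unfold Spec_scrambler scrambler scrambler_alt
  show (bits.foldl scrStepA (scrSeed, [])).2 = _
  rw [scrA_eq_pure bits scrSeed []]
  have h := scrB_eq_pure bits 0
  simp only [Function.iterate_zero, id] at h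
  simpa [PySem.List.enumerate] using h.symm
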